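-- pv_equiv track=rewrite | github.com/ManianVSS/Karta.py | framework/core/utils/datautils.py | increment_alphanumerical_string
-- ===== SOURCE A (Python) =====
-- def in_range(value, min_value, max_value, include_min=True, include_max=True):
--     return (((value >= min_value) if include_min else (value > min_value))
--             and
--             ((value <= max_value) if include_max else (value < max_value)))
--
-- def increment_char(c):
--     return chr(ord(c) + 1)
--
-- def increment_alphanumerical_string(current_string):
--     char_array = list(current_string)
--
--     carry = 1
--     for j in range(len(char_array) - 1, -1, -1):
--         if carry > 0:
--             if in_range(char_array[j], 'a', 'z'):
--                 if char_array[j] != 'z':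
--                     char_array[j] = increment_char(char_array[j])
--                     carry = 0
--                     break
--                 else:
--                     char_array[j] = 'a'
--                     carry = 1
--
--             elif in_range(char_array[j], 'A', 'Z'):
--                 if char_array[j] != 'Z':
--                     char_array[j] = increment_char(char_array[j])
--                     carry = 0
--                     break
--                 else:
--                     char_array[j] = 'A'
--                     carry = 1
--
--             elif in_range(char_array[j], '0', '9'):
--                 if char_array[j] != '9':
--                     char_array[j] = increment_char(char_array[j])
--                     carry = 0
--                     break
--                 else:
--                     char_array[j] = '0'
--                     carry = 1
--
--     return str(char_array), carry
-- ===== SOURCE B (Python) =====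
-- def increment_alphanumerical_string(current_string):
--     WRAP = {'z': 'a', 'Z': 'A', '9': '0'}
--
--     def bumpable(c):
--         return ('a' <= c <= 'z' or 'A' <= c <= 'Z' or '0' <= c <= '9') and c not in WRAP
--
--     chars = list(current_string)
--     pivots = [j for j, c in enumerate(chars) if bumpable(c)]
--     if not pivots:
--         return str([WRAP.get(c, c) for c in chars]), 1
--     p = pivots[-1]
--     out = chars[:p] + [chr(ord(chars[p]) + 1)] + [WRAP.get(c, c) for c in chars[p + 1:]]
--     return str(out), 0
-- ===== Notes on version B (the rewrite author's own statement) =====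
-- stated objective: alternative
-- what changed: Replaces A's right-to-left carry-propagating loop with break by a two-stage pivot algorithm: one forward pass collects the positions of incrementable alphanumerics, then the result is rebuilt by slicing at the last such position (prefix kept, pivot bumped, maxed alphanumerics in the suffix wrapped via a dict), with carry 1 exactly when no pivot exists.
import Mathlib
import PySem

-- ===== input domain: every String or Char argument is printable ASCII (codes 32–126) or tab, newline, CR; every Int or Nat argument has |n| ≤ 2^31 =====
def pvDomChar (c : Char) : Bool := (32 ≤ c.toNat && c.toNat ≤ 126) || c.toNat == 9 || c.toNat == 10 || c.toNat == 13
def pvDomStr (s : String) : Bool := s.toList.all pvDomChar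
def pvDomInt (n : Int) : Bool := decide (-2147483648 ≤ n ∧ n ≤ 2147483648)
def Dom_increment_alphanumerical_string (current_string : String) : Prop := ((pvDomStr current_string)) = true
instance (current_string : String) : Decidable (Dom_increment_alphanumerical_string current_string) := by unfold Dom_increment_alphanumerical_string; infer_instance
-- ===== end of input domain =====

set_option maxRecDepth 4000


-- B replaces A's right-to-left carry loop by a two-stage pivot algorithm: find the last
-- incrementable alphanumeric, then rebuild the string by slicing; same cost, alternative algorithm.

-- ===== PORT A =====
-- Python's str(list_of_one_char_strings): "[...]" with each char shown as repr.
-- Exact for the Dom characters (printable ASCII plus tab/newline/CR); both Pythons call str(list).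
def pyCharReprChars (c : Char) : List Char :=
  if c = '\\' then ['\'', '\\', '\\', '\'']
  else if c = '\'' then ['"', '\'', '"']
  else if c = '\t' then ['\'', '\\', 't', '\'']
  else if c = '\n' then ['\'', '\\', 'n', '\'']
  else if c = '\r' then ['\'', '\\', 'r', '\'']
  else ['\'', c, '\'']

def pyListStr (xs : List Char) : String :=
  String.ofList ('[' :: List.intercalate [',', ' '] (xs.map pyCharReprChars) ++ [']'])

def in_range (value min_value max_value : Char) (include_min include_max : Bool) : Bool :=
  (if include_min then decide (value ≥ min_value) else decide (value > min_value))
  && (if include_max then decide (value ≤ max_value) else decide (value < max_value))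

def increment_char (c : Char) : Char := Char.ofNat (c.toNat + 1)

-- one iteration of A's for-loop; state = (char_array, carry, broken); broken models 'break'
def aStep (st : List Char × Int × Bool) (j : Int) : List Char × Int × Bool :=
  match st with
  | (arr, carry, broken) =>
    if broken then (arr, carry, broken)
    else if carry > 0 then
      let cj := PySem.List.pyGetD arr j ' '   -- j is always a valid index here, default unreachable
      if in_range cj 'a' 'z' true true then
        if cj ≠ 'z' then (arr.set j.toNat (increment_char cj), 0, true)
        else (arr.set j.toNat 'a', 1, false)
      else if in_range cj 'A' 'Z' true true then
        if cj ≠ 'Z' then (arr.set j.toNat (increment_char cj), 0, true)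
        else (arr.set j.toNat 'A', 1, false)
      else if in_range cj '0' '9' true true then
        if cj ≠ '9' then (arr.set j.toNat (increment_char cj), 0, true)
        else (arr.set j.toNat '0', 1, false)
      else (arr, carry, broken)
    else (arr, carry, broken)

def increment_alphanumerical_string (current_string : String) : String × Int :=
  let char_array := current_string.toList
  let r := (PySem.List.pyRange ((char_array.length : Int) - 1) (-1) (-1)).foldl
      aStep (char_array, 1, false)
  (pyListStr r.1, r.2.1)

-- ===== PORT B =====
def bWRAP : PySem.Dict Char Char := PySem.Dict.ofList [('z', 'a'), ('Z', 'A'), ('9', '0')]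

def bumpable (c : Char) : Bool :=
  (decide ('a' ≤ c) && decide (c ≤ 'z') || decide ('A' ≤ c) && decide (c ≤ 'Z')
    || decide ('0' ≤ c) && decide (c ≤ '9'))
  && !(bWRAP.contains c)

def increment_alphanumerical_string_alt (current_string : String) : String × Int :=
  let chars := current_string.toList
  let pivots := ((PySem.List.enumerate chars).filter (fun jc => bumpable jc.2)).map Prod.fst
  match pivots.getLast? with     -- pivots[-1] if pivots else the no-pivot branch
  | none => (pyListStr (chars.map (fun c => bWRAP.getD c c)), 1)
  | some p =>
      (pyListStr (PySem.List.slice chars none (some p)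
        ++ [Char.ofNat ((PySem.List.pyGetD chars p ' ').toNat + 1)]   -- p is a valid index here
        ++ (PySem.List.slice chars (some (p + 1)) none).map (fun c => bWRAP.getD c c)), 0)

-- ===== PRECONDITION & SPEC =====
def Spec_increment_alphanumerical_string (current_string : String) (out : String × Int) : Prop := out = increment_alphanumerical_string_alt current_string
instance (current_string : String) (out : String × Int) : Decidable (Spec_increment_alphanumerical_string current_string out) := by unfold Spec_increment_alphanumerical_string; infer_instance

-- ===== CLAIM (what is proved, stated in full; the proofs are below) =====
def Claim_equal_increment_alphanumerical_string : Prop := ∀ (current_string : String), Dom_increment_alphanumerical_string current_string → Spec_increment_alphanumerical_string current_string (increment_alphanumerical_string current_string)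

-- ===== LEMMAS AND PROOFS =====

-- right-to-left per-character behaviour shared by both programs
def bStep (c : Char) (carry : Int) : Char × Int :=
  if carry = 0 then (c, 0)
  else if 'a' ≤ c ∧ c ≤ 'z' then (if c = 'z' then ('a', 1) else (Char.ofNat (c.toNat + 1), 0))
  else if 'A' ≤ c ∧ c ≤ 'Z' then (if c = 'Z' then ('A', 1) else (Char.ofNat (c.toNat + 1), 0))
  else if '0' ≤ c ∧ c ≤ '9' then (if c = '9' then ('0', 1) else (Char.ofNat (c.toNat + 1), 0))
  else (c, carry)

-- spec of the right-to-left carry scan, processing the REVERSED string head first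
def hScan : List Char → Int → List Char × Int
  | [], k => ([], k)
  | c :: cs, k =>
    let p := bStep c k
    let q := hScan cs p.2
    (p.1 :: q.1, q.2)

-- the same scan on the forward string (carry computed from the tail first)
def fwd : List Char → List Char × Int
  | [] => ([], 1)
  | c :: cs =>
    let q := fwd cs
    let p := bStep c q.2
    (p.1 :: q.1, p.2)

-- index of the last bumpable character
def lastPivot : List Char → Option Nat
  | [] => none
  | c :: cs =>
    match lastPivot cs with
    | some q => some (q + 1)
    | none => if bumpable c then some 0 else none

theorem bStep_carry (c : Char) (k : Int) (hk : k = 0 ∨ k = 1) :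
    (bStep c k).2 = 0 ∨ (bStep c k).2 = 1 := by
  rcases hk with h | h <;> subst h
  · simp [bStep]
  · simp only [bStep]; split_ifs <;> simp

theorem set_append_cons (xs : List Char) (c x : Char) (post : List Char) :
    (xs ++ c :: post).set xs.length x = xs ++ x :: post := by
  induction xs with
  | nil => rfl
  | cons y ys ih => simp [ih]

theorem aStep_broken (arr : List Char) (j : Int) : aStep (arr, 0, true) j = (arr, 0, true) := by
  simp [aStep]

theorem aStep_at (xs : List Char) (c : Char) (post : List Char) :
    aStep (xs ++ c :: post, 1, false) ((xs.length : Int))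
      = (xs ++ (bStep c 1).1 :: post, (bStep c 1).2, decide ((bStep c 1).2 = 0)) := by
  have hget : PySem.List.pyGetD (xs ++ c :: post) ((xs.length : Int)) ' ' = c := by
    rw [PySem.List.pyGetD_natCast]
    simp [List.getD]
  have hset : ∀ x', (xs ++ c :: post).set ((xs.length : Int)).toNat x' = xs ++ x' :: post := by
    intro x'
    rw [Int.toNat_natCast]
    exact set_append_cons xs c x' post
  simp only [aStep, Bool.false_eq_true, if_false, if_pos (by norm_num : (1:Int) > 0), hget]
  by_cases ha : 'a' ≤ c ∧ c ≤ 'z'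
  · by_cases hz : c = 'z'
    · subst hz; simp [in_range, bStep]
    · simp [in_range, ha.1, ha.2, bStep, hz, increment_char]
  · have ha' : in_range c 'a' 'z' true true = false := by
      simp only [in_range, ge_iff_le, Bool.and_eq_false_iff]
      rcases not_and_or.mp ha with h | h <;> simp [h]
    by_cases hA : 'A' ≤ c ∧ c ≤ 'Z'
    · by_cases hZ : c = 'Z'
      · subst hZ; simp [in_range, bStep]
      · simp [in_range, hA.1, hA.2, bStep, hZ, increment_char, ha]
    · have hA' : in_range c 'A' 'Z' true true = false := by
        simp only [in_range, ge_iff_le, Bool.and_eq_false_iff]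
        rcases not_and_or.mp hA with h | h <;> simp [h]
      by_cases h0 : '0' ≤ c ∧ c ≤ '9'
      · by_cases h9 : c = '9'
        · subst h9; simp [in_range, bStep]
        · simp [in_range, h0.1, h0.2, bStep, h9, increment_char, ha, hA]
      · have h0' : in_range c '0' '9' true true = false := by
          simp only [in_range, ge_iff_le, Bool.and_eq_false_iff]
          rcases not_and_or.mp h0 with h | h <;> simp [h]
        simp [ha', hA', h0', bStep, ha, hA, h0]

theorem aFold_eq_hScan (rs : List Char) : ∀ (pre post : List Char) (k : Int) (b : Bool),
    b = decide (k = 0) → (k = 0 ∨ k = 1) →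
    (PySem.List.pyRange ((pre.length : Int) + rs.length - 1) ((pre.length : Int) - 1) (-1)).foldl
        aStep (pre ++ rs.reverse ++ post, k, b)
      = (pre ++ (hScan rs k).1.reverse ++ post, (hScan rs k).2, decide ((hScan rs k).2 = 0)) := by
  induction rs with
  | nil =>
    intro pre post k b hb hk
    rw [PySem.List.pyRange_neg_one_eq_nil (by simp)]
    simp [hScan, hb]
  | cons c cs ih =>
    intro pre post k b hb hk
    have hlen : ((pre.length : Int) + (c :: cs).length - 1) = ((pre ++ cs.reverse).length : Int) := by
      push_cast [List.length_append, List.length_reverse, List.length_cons]; ring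
    have harr : pre ++ (c :: cs).reverse ++ post = (pre ++ cs.reverse) ++ c :: post := by
      simp
    have hrest : ((pre ++ cs.reverse).length : Int) - 1 = (pre.length : Int) + (cs.length : Int) - 1 := by
      push_cast [List.length_append, List.length_reverse]; ring
    rw [hlen, PySem.List.pyRange_neg_one_cons
      (by push_cast [List.length_append, List.length_reverse]; omega), List.foldl_cons, harr]
    rcases hk with h0 | h1
    · subst h0
      have hb' : b = true := by simpa using hb
      subst hb'
      rw [aStep_broken, hrest]
      have := ih pre (c :: post) 0 true (by simp) (Or.inl rfl)
      simp only [List.append_assoc] at this ⊢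
      rw [this]
      simp [hScan, bStep]
    · subst h1
      have hb' : b = false := by simpa using hb
      subst hb'
      rw [aStep_at (pre ++ cs.reverse) c post, hrest]
      have := ih pre ((bStep c 1).1 :: post) (bStep c 1).2
        (decide ((bStep c 1).2 = 0)) rfl (bStep_carry c 1 (Or.inr rfl))
      simp only [List.append_assoc] at this ⊢
      rw [this]
      simp [hScan]

theorem hScan_append (xs ys : List Char) (k : Int) :
    hScan (xs ++ ys) k
      = ((hScan xs k).1 ++ (hScan ys (hScan xs k).2).1, (hScan ys (hScan xs k).2).2) := by
  induction xs generalizing k with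
  | nil => simp [hScan]
  | cons c cs ih => simp [hScan, ih]

theorem fwd_hScan (cs : List Char) :
    hScan cs.reverse 1 = ((fwd cs).1.reverse, (fwd cs).2) := by
  induction cs with
  | nil => simp [hScan, fwd]
  | cons c cs ih =>
    rw [List.reverse_cons, hScan_append, ih]
    simp [hScan, fwd]

theorem bStep_zero (c : Char) : bStep c 0 = (c, 0) := by simp [bStep]

theorem bWRAP_mk : bWRAP = PySem.Dict.mk [('z', 'a'), ('Z', 'A'), ('9', '0')] := by decide

theorem bWrap_eval (c : Char) (hz : ¬ c = 'z') (hZ : ¬ c = 'Z') (h9 : ¬ c = '9') :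
    bWRAP.getD c c = c := by
  have e1 : ('z' == c) = false := by simp [Ne.symm hz]
  have e2 : ('Z' == c) = false := by simp [Ne.symm hZ]
  have e3 : ('9' == c) = false := by simp [Ne.symm h9]
  rw [bWRAP_mk]
  simp [PySem.Dict.getD, PySem.Dict.get?, List.find?, e1, e2, e3]

theorem contains_eval (c : Char) :
    bWRAP.contains c = (c = 'z' || c = 'Z' || c = '9') := by
  by_cases hz : c = 'z'
  · subst hz; decide
  by_cases hZ : c = 'Z'
  · subst hZ; decide
  by_cases h9 : c = '9'
  · subst h9; decide
  have e1 : ('z' == c) = false := by simp [Ne.symm hz]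
  have e2 : ('Z' == c) = false := by simp [Ne.symm hZ]
  have e3 : ('9' == c) = false := by simp [Ne.symm h9]
  rw [bWRAP_mk]
  simp [PySem.Dict.contains_mk, e1, e2, e3, hz, hZ, h9]

theorem bStep_nonbump (c : Char) (h : bumpable c = false) :
    bStep c 1 = (bWRAP.getD c c, 1) := by
  by_cases hz : c = 'z'
  · subst hz; decide
  by_cases hZ : c = 'Z'
  · subst hZ; decide
  by_cases h9 : c = '9'
  · subst h9; decide
  rw [bWrap_eval c hz hZ h9]
  simp only [bumpable, contains_eval, hz, hZ, h9, decide_false, Bool.or_false,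
    Bool.not_false, Bool.and_true, Bool.or_eq_false_iff, Bool.and_eq_false_iff,
    decide_eq_false_iff_not] at h
  obtain ⟨⟨ha, hA⟩, h0⟩ := h
  simp [bStep, not_and_or.mpr ha, not_and_or.mpr hA, not_and_or.mpr h0]

theorem bStep_bump (c : Char) (h : bumpable c = true) :
    bStep c 1 = (Char.ofNat (c.toNat + 1), 0) := by
  simp only [bumpable, contains_eval, Bool.and_eq_true, Bool.not_eq_true',
    Bool.or_eq_false_iff, Bool.or_eq_true, Bool.and_eq_true, decide_eq_true_eq,
    decide_eq_false_iff_not] at h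
  obtain ⟨hr, ⟨hz, hZ⟩, h9⟩ := h
  simp only [bStep, if_neg (by norm_num : ¬ (1:Int) = 0)]
  rcases hr with (⟨h1, h2⟩ | ⟨h1, h2⟩) | ⟨h1, h2⟩ <;> split_ifs <;> simp_all

theorem fwd_no_pivot (cs : List Char) (h : lastPivot cs = none) :
    fwd cs = (cs.map (fun c => bWRAP.getD c c), 1) := by
  induction cs with
  | nil => simp [fwd]
  | cons c cs ih =>
    simp only [lastPivot] at h
    cases hq : lastPivot cs with
    | some q => rw [hq] at h; simp at h
    | none =>
      rw [hq] at h
      have hc : bumpable c = false := by by_cases hb : bumpable c = true <;> simp_all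
      simp [fwd, ih hq, bStep_nonbump c hc]

theorem fwd_pivot (cs : List Char) : ∀ q, lastPivot cs = some q →
    fwd cs = (cs.take q ++ Char.ofNat ((cs.getD q ' ').toNat + 1) :: (cs.drop (q + 1)).map (fun c => bWRAP.getD c c), 0) := by
  induction cs with
  | nil => intro q h; simp [lastPivot] at h
  | cons c cs ih =>
    intro q h
    simp only [lastPivot] at h
    cases hq : lastPivot cs with
    | some r =>
      rw [hq] at h
      simp only [Option.some.injEq] at h
      subst h
      simp [fwd, ih r hq, bStep_zero, List.getD]
    | none =>
      rw [hq] at h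
      have hc : bumpable c = true := by by_cases hb : bumpable c = true <;> simp_all
      have hq0 : q = 0 := by simp [hc] at h; omega
      subst hq0
      simp [fwd, fwd_no_pivot cs hq, bStep_bump c hc, List.getD]

theorem pivots_getLast (cs : List Char) : ∀ (s : Int),
    (((PySem.List.enumerate cs s).filter (fun jc => bumpable jc.2)).map Prod.fst).getLast?
      = (lastPivot cs).map (fun k => s + k) := by
  induction cs with
  | nil => intro s; simp [PySem.List.enumerate, lastPivot]
  | cons c cs ih =>
    intro s
    rw [PySem.List.enumerate_cons]
    by_cases hc : bumpable c
    · rw [List.filter_cons_of_pos (by simpa using hc), List.map_cons,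
        List.getLast?_cons, ih (s + 1)]
      simp only [lastPivot]
      cases hq : lastPivot cs with
      | some q => simp; omega
      | none => simp [hc]
    · rw [List.filter_cons_of_neg (by simpa using hc), ih (s + 1)]
      simp only [lastPivot]
      cases hq : lastPivot cs with
      | some q => simp; omega
      | none => simp [hc]

-- ===== VERDICT (by name: the statement is the Claim_ definition above) =====
theorem increment_alphanumerical_string_spec : Claim_equal_increment_alphanumerical_string := by
  intro s _
  unfold Spec_increment_alphanumerical_string
  unfold increment_alphanumerical_string increment_alphanumerical_string_alt
  dsimp only
  have hA := aFold_eq_hScan s.toList.reverse [] [] 1 false (by simp) (Or.inr rfl)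
  simp only [List.reverse_reverse, List.append_nil, List.nil_append, List.length_nil,
    List.length_reverse, Nat.cast_zero, zero_add, zero_sub] at hA
  rw [hA, fwd_hScan, pivots_getLast s.toList 0]
  cases hq : lastPivot s.toList with
  | none =>
    rw [fwd_no_pivot _ hq]
    simp
  | some q =>
    rw [fwd_pivot _ q hq]
    simp only [Option.map_some, Option.bind_some, Option.pure_def, zero_add,
      List.reverse_reverse, Option.bind_eq_bind]
    rw [PySem.List.slice_to_natCast, PySem.List.pyGetD_natCast,
      show ((q : Int) + 1) = ((q + 1 : Nat) : Int) by push_cast; ring,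
      PySem.List.slice_from_natCast]
    simp
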